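-- pv_equiv track=rewrite | github.com/MochAndimas/network_monitoring | backend/app/services/monitoring_service.py | status_rollup_from_counts
-- ===== SOURCE A (Python) =====
-- def status_rollup_from_counts(status_counts: dict[str, int] | None) -> str:
--     """Handle status rollup from counts for business services that coordinate repositories and domain workflows.
--
--     Args:
--         status_counts: status counts value used by this routine (type `dict[str, int] | None`).
--
--     Returns:
--         `str` result produced by the routine.
--     """
--     if not status_counts:
--         return "unknown"
--
--     normalized = {str(status).lower(): count for status, count in status_counts.items() if count}
--     if not normalized:
--         return "unknown"
--     if any(status in {"down", "critical", "error"} for status in normalized):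
--         return "down"
--     if any(status in {"warning", "degraded", "unavailable"} for status in normalized):
--         return "warning"
--     if all(status in {"up", "healthy", "ok"} for status in normalized):
--         return "up"
--     return next(iter(normalized))
-- ===== SOURCE B (Python) =====
-- _GROUP = {
--     "down": "down", "critical": "down", "error": "down",
--     "warning": "warning", "degraded": "warning", "unavailable": "warning",
--     "up": "up", "healthy": "up", "ok": "up",
-- }
--
--
-- def status_rollup_from_counts(status_counts: dict[str, int] | None) -> str:
--     if not status_counts:
--         return "unknown"
--     first = None
--     has_down = has_warning = False
--     all_up = True
--     for status, count in status_counts.items():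
--         if not count:
--             continue
--         key = str(status).lower()
--         if first is None:
--             first = key
--         group = _GROUP.get(key)
--         if group == "down":
--             has_down = True
--         elif group == "warning":
--             has_warning = True
--         elif group != "up":
--             all_up = False
--     if first is None:
--         return "unknown"
--     if has_down:
--         return "down"
--     if has_warning:
--         return "warning"
--     if all_up:
--         return "up"
--     return first
-- ===== Notes on version B (the rewrite author's own statement) =====
-- stated objective: simpler
-- what changed: Replaces the dict comprehension plus four separate any/all scans over the normalized keys with a static reverse-lookup group table and one pass over the items that sets flags and captures the first surviving key.
import Mathlib
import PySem

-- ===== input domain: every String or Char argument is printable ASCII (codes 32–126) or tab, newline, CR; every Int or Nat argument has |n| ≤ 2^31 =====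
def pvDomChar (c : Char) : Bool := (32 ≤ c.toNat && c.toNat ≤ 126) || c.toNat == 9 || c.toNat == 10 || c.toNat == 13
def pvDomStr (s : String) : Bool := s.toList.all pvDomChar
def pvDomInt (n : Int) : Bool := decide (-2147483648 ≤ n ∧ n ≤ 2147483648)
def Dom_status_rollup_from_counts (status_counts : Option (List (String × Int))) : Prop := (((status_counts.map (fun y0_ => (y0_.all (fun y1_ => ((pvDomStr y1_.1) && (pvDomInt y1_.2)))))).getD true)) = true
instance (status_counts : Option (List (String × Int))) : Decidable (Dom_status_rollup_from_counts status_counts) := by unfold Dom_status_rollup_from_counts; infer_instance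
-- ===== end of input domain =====

-- B replaces the dict comprehension plus four any/all scans by a reverse-lookup group
-- table and a single flag-collecting pass over the items (simpler decomposition).

-- ===== PORT A =====
def status_rollup_from_counts (status_counts : Option (List (String × Int))) : String :=
  match status_counts with
  | none => "unknown"
  | some items =>
    if items.isEmpty then "unknown"
    else
      -- dict comprehension: {str(status).lower(): count for status, count in … if count}
      let normalized : PySem.Dict String Int :=
        items.foldl (fun d kv => if kv.2 ≠ 0 then d.insert (PySem.Str.lower kv.1) kv.2 else d)
          PySem.Dict.empty
      if normalized.items.isEmpty then "unknown"
      else if normalized.keys.any (fun s => s == "down" || s == "critical" || s == "error") then "down"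
      else if normalized.keys.any (fun s => s == "warning" || s == "degraded" || s == "unavailable") then "warning"
      else if normalized.keys.all (fun s => s == "up" || s == "healthy" || s == "ok") then "up"
      else normalized.keys.headD ""   -- next(iter(normalized)); keys nonempty on this branch

-- ===== PORT B =====
def pvGroup : PySem.Dict String String :=
  PySem.Dict.mk [("down", "down"), ("critical", "down"), ("error", "down"),
                 ("warning", "warning"), ("degraded", "warning"), ("unavailable", "warning"),
                 ("up", "up"), ("healthy", "up"), ("ok", "up")]

def pvStepB (acc : Option String × Bool × Bool × Bool) (kv : String × Int) :
    Option String × Bool × Bool × Bool :=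
  if kv.2 = 0 then acc
  else
    let key := PySem.Str.lower kv.1
    let first := if acc.1 = none then some key else acc.1
    let g := pvGroup.get? key
    if g = some "down" then (first, true, acc.2.2.1, acc.2.2.2)
    else if g = some "warning" then (first, acc.2.1, true, acc.2.2.2)
    else if g ≠ some "up" then (first, acc.2.1, acc.2.2.1, false)
    else (first, acc.2.1, acc.2.2.1, acc.2.2.2)

def status_rollup_from_counts_alt (status_counts : Option (List (String × Int))) : String :=
  match status_counts with
  | none => "unknown"
  | some items =>
    if items.isEmpty then "unknown"
    else
      match items.foldl pvStepB (none, false, false, true) with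
      | (none, _, _, _) => "unknown"
      | (some first, hd, hw, au) =>
        if hd then "down" else if hw then "warning" else if au then "up" else first

-- ===== PRECONDITION & SPEC =====
def Spec_status_rollup_from_counts (status_counts : Option (List (String × Int))) (out : String) : Prop := out = status_rollup_from_counts_alt status_counts
instance (status_counts : Option (List (String × Int))) (out : String) : Decidable (Spec_status_rollup_from_counts status_counts out) := by unfold Spec_status_rollup_from_counts; infer_instance

-- ===== CLAIM (what is proved, stated in full; the proofs are below) =====
def Claim_equal_status_rollup_from_counts : Prop := ∀ (status_counts : Option (List (String × Int))), Dom_status_rollup_from_counts status_counts → Spec_status_rollup_from_counts status_counts (status_rollup_from_counts status_counts)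

-- ===== LEMMAS AND PROOFS =====

def pvKeys (items : List (String × Int)) : List String :=
  (items.filter (fun kv => decide (kv.2 ≠ 0))).map (fun kv => PySem.Str.lower kv.1)

def pvD (s : String) : Bool := decide (pvGroup.get? s = some "down")
def pvW (s : String) : Bool := decide (pvGroup.get? s = some "warning")
def pvU (s : String) : Bool := pvD s || pvW s || decide (pvGroup.get? s = some "up")

-- pointwise characterisations of the group table
theorem pvD_eq (s : String) : pvD s = (s == "down" || s == "critical" || s == "error") := by
  by_cases h1 : s = "down"
  · subst h1; decide
  by_cases h2 : s = "critical"
  · subst h2; decide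
  by_cases h3 : s = "error"
  · subst h3; decide
  simp only [pvD, pvGroup, PySem.Dict.get?_mk_cons]
  split_ifs <;> simp_all [PySem.Dict.get?]

theorem pvW_eq (s : String) : pvW s = (s == "warning" || s == "degraded" || s == "unavailable") := by
  by_cases h1 : s = "warning"
  · subst h1; decide
  by_cases h2 : s = "degraded"
  · subst h2; decide
  by_cases h3 : s = "unavailable"
  · subst h3; decide
  simp only [pvW, pvGroup, PySem.Dict.get?_mk_cons]
  split_ifs <;> simp_all [PySem.Dict.get?]

theorem pvUp_eq (s : String) :
    decide (pvGroup.get? s = some "up") = (s == "up" || s == "healthy" || s == "ok") := by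
  by_cases h1 : s = "up"
  · subst h1; decide
  by_cases h2 : s = "healthy"
  · subst h2; decide
  by_cases h3 : s = "ok"
  · subst h3; decide
  simp only [pvGroup, PySem.Dict.get?_mk_cons]
  split_ifs <;> simp_all [PySem.Dict.get?]

-- B's fold computes first key, any-down, any-warning, all-grouped over pvKeys
theorem foldB_inv (l : List (String × Int)) :
    ∀ f hd hw au, l.foldl pvStepB (f, hd, hw, au) =
      (Option.or f (pvKeys l).head?, hd || (pvKeys l).any pvD, hw || (pvKeys l).any pvW,
       au && (pvKeys l).all pvU) := by
  induction l with
  | nil => intro f hd hw au; simp [pvKeys]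
  | cons kv t ih =>
    intro f hd hw au
    by_cases h0 : kv.2 = 0
    · have hk : pvKeys (kv :: t) = pvKeys t := by simp [pvKeys, h0]
      simp [List.foldl_cons, pvStepB, h0, hk, ih]
    · have hk : pvKeys (kv :: t) = PySem.Str.lower kv.1 :: pvKeys t := by
        simp [pvKeys, h0]
      set key := PySem.Str.lower kv.1 with hkey
      have hstep : pvStepB (f, hd, hw, au) kv =
          ((if f = none then some key else f),
            hd || pvD key, hw || pvW key, au && pvU key) := by
        simp only [pvStepB, h0, pvD, pvW, pvU, ← hkey]
        by_cases hd1 : pvGroup.get? key = some "down" <;>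
          by_cases hw1 : pvGroup.get? key = some "warning" <;>
          by_cases hu1 : pvGroup.get? key = some "up" <;>
          simp_all
      rw [List.foldl_cons, hstep, ih, hk]
      cases f <;> simp [Option.or, Bool.or_assoc, Bool.and_assoc]

theorem any_ofList (p : String → Bool) (ks : List String) :
    (PySem.Set.ofList ks).any p = ks.any p := by
  rw [Bool.eq_iff_iff]
  simp only [List.any_eq_true, PySem.Set.mem_ofList]

theorem all_ofList (p : String → Bool) (ks : List String) :
    (PySem.Set.ofList ks).all p = ks.all p := by
  rw [Bool.eq_iff_iff]
  simp only [List.all_eq_true, PySem.Set.mem_ofList]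

theorem keysA (items : List (String × Int)) :
    (items.foldl
      (fun d kv => if kv.2 ≠ 0 then d.insert (PySem.Str.lower kv.1) kv.2 else d)
      (PySem.Dict.empty : PySem.Dict String Int)).keys = PySem.Set.ofList (pvKeys items) := by
  rw [PySem.List.foldl_ite_eq_foldl_filter]
  have h := PySem.Dict.keys_foldl_insert_key (ν := Int)
    (items.filter (fun x => decide (x.2 ≠ 0))) (fun kv => PySem.Str.lower kv.1)
    (fun _ kv => kv.2) PySem.Dict.empty
  simpa [PySem.Dict.keys_empty, PySem.Set.update_nil_left, pvKeys] using h

-- ===== VERDICT (by name: the statement is the Claim_ definition above) =====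
theorem status_rollup_from_counts_spec : Claim_equal_status_rollup_from_counts := by
  intro sc _
  unfold Spec_status_rollup_from_counts
  cases sc with
  | none => rfl
  | some items =>
    by_cases he : items.isEmpty
    · simp [status_rollup_from_counts, status_rollup_from_counts_alt, he]
    · have he' : items.isEmpty = false := Bool.eq_false_iff.mpr he
      simp only [status_rollup_from_counts, status_rollup_from_counts_alt, he',
        Bool.false_eq_true, if_false]
      rw [foldB_inv]
      have hkeys := keysA items
      cases hks : pvKeys items with
      | nil =>
        rw [hks] at hkeys
        have hit : (items.foldl
            (fun d kv => if kv.2 ≠ 0 then d.insert (PySem.Str.lower kv.1) kv.2 else d)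
            (PySem.Dict.empty : PySem.Dict String Int)).items = [] := by
          have hk0 : (items.foldl
              (fun d kv => if kv.2 ≠ 0 then d.insert (PySem.Str.lower kv.1) kv.2 else d)
              (PySem.Dict.empty : PySem.Dict String Int)).keys = [] := by
            rw [hkeys]; rfl
          simpa [PySem.Dict.keys, List.map_eq_nil_iff] using hk0
        rw [hit]
        simp [Option.or]
      | cons k kt =>
        rw [hks] at hkeys
        have hitne : (items.foldl
            (fun d kv => if kv.2 ≠ 0 then d.insert (PySem.Str.lower kv.1) kv.2 else d)
            (PySem.Dict.empty : PySem.Dict String Int)).items.isEmpty = false := by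
          apply Bool.eq_false_iff.mpr
          intro hcontra
          have hk0 : (items.foldl
              (fun d kv => if kv.2 ≠ 0 then d.insert (PySem.Str.lower kv.1) kv.2 else d)
              (PySem.Dict.empty : PySem.Dict String Int)).keys = [] := by
            have h0 := List.isEmpty_iff.mp hcontra
            simp only [PySem.Dict.keys, h0, List.map_nil]
          rw [hkeys] at hk0
          simp [PySem.Set.ofList_cons] at hk0
        rw [hitne]
        simp only [Bool.false_eq_true, if_false]
        rw [hkeys, any_ofList, any_ofList, all_ofList]
        have hD : ((k :: kt).any fun s => s == "down" || s == "critical" || s == "error")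
            = (k :: kt).any pvD := by
          apply PySem.List.any_congr_mem; intro x _; rw [pvD_eq]
        have hW : ((k :: kt).any fun s => s == "warning" || s == "degraded" || s == "unavailable")
            = (k :: kt).any pvW := by
          apply PySem.List.any_congr_mem; intro x _; rw [pvW_eq]
        rw [hD, hW]
        simp only [List.head?_cons, Option.or, Bool.false_or, Bool.true_and]
        by_cases hd : (k :: kt).any pvD
        · simp [hd]
        · by_cases hw : (k :: kt).any pvW
          · simp [hd, hw]
          · have hUeq : ((k :: kt).all fun s => s == "up" || s == "healthy" || s == "ok")
                = (k :: kt).all pvU := by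
              rw [Bool.eq_iff_iff]
              simp only [List.all_eq_true]
              constructor
              · intro h x hx
                simp only [pvU, Bool.or_eq_true]
                right; rw [pvUp_eq]; exact h x hx
              · intro h x hx
                have hdx : pvD x = false := by
                  have := List.any_eq_false.mp (Bool.eq_false_iff.mpr hd) x hx
                  simpa using this
                have hwx : pvW x = false := by
                  have := List.any_eq_false.mp (Bool.eq_false_iff.mpr hw) x hx
                  simpa using this
                have hux := h x hx
                simp only [pvU, hdx, hwx, Bool.false_or] at hux
                rw [← pvUp_eq]
                simpa using hux
            rw [hUeq]
            by_cases hu : (k :: kt).all pvU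
            · simp [hd, hw, hu]
            · simp [hd, hw, hu, PySem.Set.ofList_cons]
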